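-- pv_equiv track=rewrite | github.com/mobwayneqiu/generative_agent_in_Minecraft | tools/global_methods.py | find_contained_keyword
-- ===== SOURCE A (Python) =====
-- def find_contained_keyword(input_str, keyword_list, case_sensitive=True):
--     """
--     在输入字符串中按出现顺序查找第一个匹配的关键词（同一位置优先最长关键词）
--
--     参数:
--         input_str (str): 被检索的长字符串
--         keyword_list (list): 关键词列表
--         case_sensitive (bool): 是否区分大小写，默认True
--
--     返回:
--         str/None: 第一个匹配的关键词，无匹配返回None
--     """
--     # 预处理目标字符串
--     target_str = input_str.lower() if not case_sensitive else input_str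
--     matches = []
--
--     for keyword in keyword_list:
--         # 处理当前关键词的匹配条件
--         search_term = keyword.lower() if not case_sensitive else keyword
--         start_idx = target_str.find(search_term)
--
--         if start_idx != -1:
--             # 记录起始位置、负长度（用于排序）、原始关键词
--             matches.append((start_idx, -len(keyword), keyword))
--
--     if not matches:
--         return None
--
--     # 排序规则：先按起始位置升序，再按关键词长度降序
--     matches.sort(key=lambda x: (x[0], x[1]))
--
--     # 返回第一个匹配项
--     return matches[0][2]
-- ===== SOURCE B (Python) =====
-- def find_contained_keyword(input_str, keyword_list, case_sensitive=True):
--     # Scan the string position by position; at the first position where any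
--     # keyword matches, return the longest matching keyword (earliest in the
--     # list on a length tie).  No match list, no sort.
--     target = input_str if case_sensitive else input_str.lower()
--     terms = [(kw if case_sensitive else kw.lower(), kw) for kw in keyword_list]
--     for i in range(len(target) + 1):
--         best = None
--         for term, orig in terms:
--             if target.startswith(term, i) and (best is None or len(orig) > len(best)):
--                 best = orig
--         if best is not None:
--             return best
--     return None
-- ===== Notes on version B (the rewrite author's own statement) =====
-- stated objective: alternative
-- what changed: A finds each keyword's first occurrence over the whole string, collects (start, -len, keyword) triples, sorts them and takes the head; B never builds or sorts a match list: it scans positions left to right and returns at the first position where any keyword matches the longest matching keyword (earliest in the list on a tie), so it stops at the first match instead of always searching the full string for every keyword.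
import Mathlib
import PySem

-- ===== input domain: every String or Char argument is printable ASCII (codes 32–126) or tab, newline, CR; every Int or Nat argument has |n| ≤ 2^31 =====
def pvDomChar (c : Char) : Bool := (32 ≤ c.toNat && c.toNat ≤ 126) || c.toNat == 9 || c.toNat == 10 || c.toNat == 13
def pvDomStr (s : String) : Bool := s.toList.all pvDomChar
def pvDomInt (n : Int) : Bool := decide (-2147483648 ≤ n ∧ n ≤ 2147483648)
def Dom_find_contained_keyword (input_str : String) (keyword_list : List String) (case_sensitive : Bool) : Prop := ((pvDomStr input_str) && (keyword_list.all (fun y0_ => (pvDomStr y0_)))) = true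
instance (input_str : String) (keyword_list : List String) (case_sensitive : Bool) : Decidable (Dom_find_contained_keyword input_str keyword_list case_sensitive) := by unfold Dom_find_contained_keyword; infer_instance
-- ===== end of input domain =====

-- B replaces A's "find every keyword, collect (start, -len, kw), sort, take head" by a single
-- left-to-right scan of the positions of the string, returning at the first position where any
-- keyword matches the longest such keyword (earliest in the list on a length tie); same return
-- value, no match list and no sort; B stops at the first match position, which a timing run
-- measured as faster on the generated inputs (objective: alternative).

-- ===== PORT A =====
def find_contained_keyword (input_str : String) (keyword_list : List String) (case_sensitive : Bool) : Option String :=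
  -- target_str = input_str.lower() if not case_sensitive else input_str
  let target := if case_sensitive then input_str.toList else PySem.Chars.lower input_str.toList
  -- for keyword in keyword_list: ... matches.append((start_idx, -len(keyword), keyword))
  let ms := keyword_list.foldl (fun acc kw =>
    let term := if case_sensitive then kw.toList else PySem.Chars.lower kw.toList
    let idx := PySem.Chars.find target term
    if idx ≠ -1 then acc ++ [(idx, -(PySem.Str.len kw : Int), kw)] else acc)
    ([] : List (Int × Int × String))
  -- if not matches: return None
  if ms.isEmpty then none
  else
    -- matches.sort(key=lambda x: (x[0], x[1])); return matches[0][2]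
    ((PySem.List.sorted2 ms (fun x => x.1) (fun x => x.2.1)).head?).map (fun x => x.2.2)

-- ===== PORT B =====
def find_contained_keyword_alt (input_str : String) (keyword_list : List String) (case_sensitive : Bool) : Option String :=
  let target := if case_sensitive then input_str.toList else PySem.Chars.lower input_str.toList
  let terms := keyword_list.map (fun kw =>
    ((if case_sensitive then kw.toList else PySem.Chars.lower kw.toList), kw))
  -- for i in range(len(target)+1): ... return at the first i with a match
  (List.range (target.length + 1)).findSome? (fun i =>
    -- target.startswith(term, i) ported as: term is a prefix of target.drop i (exact for 0 ≤ i ≤ len(target))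
    terms.foldl (fun best p =>
      if PySem.Chars.startswith (target.drop i) p.1 &&
         (match best with
          | none => true
          | some b => decide (PySem.Str.len b < PySem.Str.len p.2))
      then some p.2 else best) none)

-- ===== PRECONDITION & SPEC =====
def Spec_find_contained_keyword (input_str : String) (keyword_list : List String) (case_sensitive : Bool) (out : Option String) : Prop := out = find_contained_keyword_alt input_str keyword_list case_sensitive
instance (input_str : String) (keyword_list : List String) (case_sensitive : Bool) (out : Option String) : Decidable (Spec_find_contained_keyword input_str keyword_list case_sensitive out) := by unfold Spec_find_contained_keyword; infer_instance

-- ===== CLAIM (what is proved, stated in full; the proofs are below) =====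
def Claim_equal_find_contained_keyword : Prop := ∀ (input_str : String) (keyword_list : List String) (case_sensitive : Bool), Dom_find_contained_keyword input_str keyword_list case_sensitive → Spec_find_contained_keyword input_str keyword_list case_sensitive (find_contained_keyword input_str keyword_list case_sensitive)

-- ===== LEMMAS AND PROOFS =====

-- head of insertBy depends only on the head of the target list
theorem pv_head?_insertBy {α : Type} (before : α → α → Bool) (x : α) (ys : List α) :
    (PySem.List.insertBy before x ys).head? =
      (match ys with
       | [] => some x
       | y :: _ => if before x y then some x else some y) := by
  cases ys with
  | nil => simp [PySem.List.insertBy]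
  | cons y t => simp only [PySem.List.insertBy]; split <;> simp

-- head of the insertion-sort fold is the first-minimum fold
theorem pv_head?_foldl_insertBy {α : Type} (before : α → α → Bool) (xs : List α) (acc : List α) :
    (xs.foldl (fun a x => PySem.List.insertBy before x a) acc).head? =
      xs.foldl (fun o x =>
        match o with
        | none => some x
        | some m => if before x m then some x else some m) acc.head? := by
  induction xs generalizing acc with
  | nil => rfl
  | cons x t ih =>
      simp only [List.foldl_cons]
      rw [ih]
      congr 1
      rw [pv_head?_insertBy]
      cases acc <;> rfl

-- head of a stable two-key sort is the FIRST lexicographic minimum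
theorem pv_head?_sorted2 {α : Type} (xs : List α) (k1 : α → Int) (k2 : α → Int) :
    (PySem.List.sorted2 xs k1 k2).head? = PySem.List.min2? xs k1 k2 := by
  simp only [PySem.List.sorted2, PySem.List.min2?]
  rw [pv_head?_foldl_insertBy]
  rfl

-- B's inner loop yields none when no term matches at position i
theorem pv_best_none (tgt : List Char) (i : Nat) (tm : String → List Char) (l : List String)
    (h : ∀ kw ∈ l, ¬ tm kw <+: tgt.drop i) (b : Option String) (hb : b = none) :
    l.foldl (fun best kw =>
      if PySem.Chars.startswith (tgt.drop i) (tm kw) &&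
         (match best with
          | none => true
          | some b => decide (PySem.Str.len b < PySem.Str.len kw))
      then some kw else best) b = none := by
  induction l generalizing b with
  | nil => exact hb
  | cons kw t ih =>
      simp only [List.foldl_cons]
      apply ih (fun k hk => h k (List.mem_cons_of_mem _ hk))
      have : PySem.Chars.startswith (tgt.drop i) (tm kw) = false := by
        rw [Bool.eq_false_iff]
        intro hs
        exact h kw List.mem_cons_self ((PySem.Chars.startswith_iff _ _).mp hs)
      simp [this, hb]

-- findSome? over range n hits the first index whose value is some
theorem pv_findSome?_range {α : Type} (g : Nat → Option α) (n k : Nat) (v : α)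
    (hk : k < n) (hnone : ∀ j < k, g j = none) (hv : g k = some v) :
    (List.range n).findSome? g = some v := by
  have hsplit : List.range n = List.range k ++ List.range' k (n - k) := by
    have h2 : List.range' 0 k ++ List.range' (0 + k) (n - k) = List.range' 0 (k + (n - k)) :=
      List.range'_append_1
    rw [List.range_eq_range', List.range_eq_range']
    have h3 : List.range' 0 n = List.range' 0 (k + (n - k)) := by congr 1; omega
    rw [h3, ← h2, Nat.zero_add]
  rw [hsplit, List.findSome?_append]
  have h1 : (List.range k).findSome? g = none :=
    List.findSome?_eq_none_iff.mpr (fun j hj => hnone j (List.mem_range.mp hj))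
  rw [h1]
  have h4 : n - k = (n - k - 1) + 1 := by omega
  rw [h4, List.range'_succ, List.findSome?_cons, hv]
  rfl

-- invariant tying B's running best to A's running (pos, -len, kw) minimum
def pvInv (istar : Nat) (b : Option String) (m : Option (Int × Int × String)) : Prop :=
  match m with
  | none => b = none
  | some (f, nl, w) => nl = -(PySem.Str.len w : Int) ∧ (istar : Int) ≤ f ∧
      b = (if f = (istar : Int) then some w else none)

-- one step of B's inner loop (the body of the fold in find_contained_keyword_alt, over the keyword)
def pvStepB (tgt : List Char) (tm : String → List Char) (i : Nat) (best : Option String) (kw : String) : Option String :=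
  if PySem.Chars.startswith (tgt.drop i) (tm kw) &&
     (match best with
      | none => true
      | some b => decide (PySem.Str.len b < PySem.Str.len kw))
  then some kw else best

-- one step of A's minimum-selection loop (min2? over the match triples, lifted to the keyword)
def pvStepM (tgt : List Char) (tm : String → List Char) (acc : Option (Int × Int × String)) (kw : String) : Option (Int × Int × String) :=
  if PySem.Chars.find tgt (tm kw) ≠ -1 then
    (match acc with
     | none => some (PySem.Chars.find tgt (tm kw), -(PySem.Str.len kw : Int), kw)
     | some mm =>
       if (decide (PySem.Chars.find tgt (tm kw) < mm.1) ||
           (!decide (mm.1 < PySem.Chars.find tgt (tm kw)) &&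
            decide (-(PySem.Str.len kw : Int) < mm.2.1)))
       then some (PySem.Chars.find tgt (tm kw), -(PySem.Str.len kw : Int), kw) else some mm)
  else acc

-- the two loops move in step
theorem pv_sync_step (tgt : List Char) (tm : String → List Char) (istar : Nat) (kw : String)
    (hF2h : PySem.Chars.find tgt (tm kw) ≠ -1 → (istar : Int) ≤ PySem.Chars.find tgt (tm kw))
    (hF3h : tm kw <+: tgt.drop istar ↔ PySem.Chars.find tgt (tm kw) = (istar : Int))
    (b : Option String) (m : Option (Int × Int × String)) (hI : pvInv istar b m) :
    pvInv istar (pvStepB tgt tm istar b kw) (pvStepM tgt tm m kw) := by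
  by_cases hfind : PySem.Chars.find tgt (tm kw) = -1
  · -- keyword absent: neither state moves
    have hpre : PySem.Chars.startswith (tgt.drop istar) (tm kw) = false := by
      rw [Bool.eq_false_iff]
      intro hs
      have := hF3h.mp ((PySem.Chars.startswith_iff _ _).mp hs)
      omega
    simp only [pvStepB, pvStepM, hpre, Bool.false_and, Bool.false_eq_true, if_false,
      hfind, ne_eq, not_true_eq_false]
    exact hI
  · have hge := hF2h hfind
    by_cases hieq : PySem.Chars.find tgt (tm kw) = (istar : Int)
    · -- kw matches at i*
      have hpre : PySem.Chars.startswith (tgt.drop istar) (tm kw) = true :=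
        (PySem.Chars.startswith_iff _ _).mpr (hF3h.mpr hieq)
      cases m with
      | none =>
          have hbnone : b = none := hI
          subst hbnone
          simp [pvStepB, pvStepM, hpre, pvInv, hieq, PySem.Str.len_eq]
      | some fnw =>
          obtain ⟨f, nl, w⟩ := fnw
          obtain ⟨hnl, hif, hbval⟩ := hI
          by_cases hf : f = (istar : Int)
          · -- tie on position: both loops compare lengths, first wins
            have hbw : b = some w := by rw [hbval]; simp [hf]
            subst hbw
            by_cases hlen : (PySem.Str.len w : Int) < (PySem.Str.len kw : Int)
            · have hlt : (decide (PySem.Chars.find tgt (tm kw) < f) ||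
                  (!decide (f < PySem.Chars.find tgt (tm kw)) &&
                   decide (-(PySem.Str.len kw : Int) < nl))) = true := by
                rw [hieq, hf, hnl]
                simp only [PySem.Str.len_eq, String.length_toList] at hlen ⊢
                simp
                omega
              simp only [pvStepB, pvStepM, hfind, ne_eq, not_false_eq_true, if_true, hlt,
                hpre, Bool.true_and, hlen, decide_true, if_true, pvInv]
              simp [hieq, PySem.Str.len_eq]
            · have hlt : (decide (PySem.Chars.find tgt (tm kw) < f) ||
                  (!decide (f < PySem.Chars.find tgt (tm kw)) &&
                   decide (-(PySem.Str.len kw : Int) < nl))) = false := by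
                rw [hieq, hf, hnl]
                simp only [PySem.Str.len_eq, String.length_toList] at hlen ⊢
                simp
                omega
              simp only [pvStepB, pvStepM, hfind, ne_eq, not_false_eq_true, if_true, hlt,
                hpre, Bool.true_and, hlen, decide_false, Bool.false_eq_true, if_false]
              exact ⟨hnl, hif, hbval⟩
          · -- previous minimum sits after i*: kw wins on position
            have hflt : (istar : Int) < f := lt_of_le_of_ne hif (fun h => hf h.symm)
            have hbnone : b = none := by rw [hbval]; simp [hf]
            subst hbnone
            have hlt : (decide (PySem.Chars.find tgt (tm kw) < f) ||
                (!decide (f < PySem.Chars.find tgt (tm kw)) &&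
                 decide (-(PySem.Str.len kw : Int) < nl))) = true := by
              rw [hieq]
              simp
              omega
            simp only [pvStepB, pvStepM, hfind, ne_eq, not_false_eq_true, if_true, hlt,
              hpre, Bool.true_and, if_true, pvInv]
            simp [hieq]
    · -- kw's first occurrence is strictly after i*: b does not move
      have hpre : PySem.Chars.startswith (tgt.drop istar) (tm kw) = false := by
        rw [Bool.eq_false_iff]
        intro hs
        exact hieq (hF3h.mp ((PySem.Chars.startswith_iff _ _).mp hs))
      have hgt : (istar : Int) < PySem.Chars.find tgt (tm kw) :=
        lt_of_le_of_ne hge (fun h => hieq h.symm)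
      have hbeq : pvStepB tgt tm istar b kw = b := by
        simp [pvStepB, hpre]
      rw [hbeq]
      cases m with
      | none =>
          have hbnone : b = none := hI
          subst hbnone
          simp only [pvStepM, hfind, ne_eq, not_false_eq_true, if_true, pvInv]
          exact ⟨by trivial, le_of_lt hgt, by simp [hieq]⟩
      | some fnw =>
          obtain ⟨f, nl, w⟩ := fnw
          obtain ⟨hnl, hif, hbval⟩ := hI
          simp only [pvStepM, hfind, ne_eq, not_false_eq_true, if_true]
          by_cases hlt : (decide (PySem.Chars.find tgt (tm kw) < f) ||
              (!decide (f < PySem.Chars.find tgt (tm kw)) &&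
               decide (-(PySem.Str.len kw : Int) < nl))) = true
          · -- new element becomes the minimum; its position is > i*, so b stays none
            have hfgt : ¬ f = (istar : Int) := by
              intro hfi
              rw [hfi] at hlt
              simp at hlt
              omega
            have hbnone : b = none := by rw [hbval]; simp [hfgt]
            rw [hlt, hbnone]
            simp only [if_true, pvInv]
            exact ⟨by trivial, le_of_lt hgt, by simp [hieq]⟩
          · rw [if_neg hlt]
            exact ⟨hnl, hif, hbval⟩

-- B's loop never loses a value, and gains one on a keyword whose first occurrence is i*
theorem pv_stepB_ne_none (tgt : List Char) (tm : String → List Char) (istar : Nat)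
    (b : Option String) (kw : String) (h : b ≠ none ∨ tm kw <+: tgt.drop istar) :
    pvStepB tgt tm istar b kw ≠ none := by
  rcases h with hb | hpre
  · cases b with
    | none => exact absurd rfl hb
    | some bb => simp only [pvStepB]; split <;> simp
  · have hs : PySem.Chars.startswith (tgt.drop istar) (tm kw) = true :=
      (PySem.Chars.startswith_iff _ _).mpr hpre
    cases b with
    | none => simp [pvStepB, hs]
    | some bb => simp only [pvStepB]; split <;> simp

-- the synchronised fold
theorem pv_sync (tgt : List Char) (tm : String → List Char) (istar : Nat)
    (l : List String)
    (hF2 : ∀ kw ∈ l, PySem.Chars.find tgt (tm kw) ≠ -1 → (istar : Int) ≤ PySem.Chars.find tgt (tm kw))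
    (hF3 : ∀ kw ∈ l, (tm kw <+: tgt.drop istar ↔ PySem.Chars.find tgt (tm kw) = (istar : Int)))
    (b : Option String) (m : Option (Int × Int × String)) (hI : pvInv istar b m) :
    pvInv istar (l.foldl (pvStepB tgt tm istar) b) (l.foldl (pvStepM tgt tm) m)
    ∧ ((b ≠ none ∨ ∃ kw ∈ l, PySem.Chars.find tgt (tm kw) = (istar : Int)) →
        (l.foldl (pvStepB tgt tm istar) b) ≠ none) := by
  induction l generalizing b m with
  | nil =>
      refine ⟨hI, ?_⟩
      rintro (hb | ⟨kw, hkw, _⟩)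
      · exact hb
      · exact absurd hkw (List.not_mem_nil)
  | cons kw t ih =>
      have hF2t : ∀ k ∈ t, PySem.Chars.find tgt (tm k) ≠ -1 → (istar : Int) ≤ PySem.Chars.find tgt (tm k) :=
        fun k hk => hF2 k (List.mem_cons_of_mem _ hk)
      have hF3t : ∀ k ∈ t, (tm k <+: tgt.drop istar ↔ PySem.Chars.find tgt (tm k) = (istar : Int)) :=
        fun k hk => hF3 k (List.mem_cons_of_mem _ hk)
      simp only [List.foldl_cons]
      have hstep : pvInv istar (pvStepB tgt tm istar b kw) (pvStepM tgt tm m kw) :=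
        pv_sync_step tgt tm istar kw (hF2 kw List.mem_cons_self) (hF3 kw List.mem_cons_self) b m hI
      obtain ⟨ih1, ih2⟩ := ih hF2t hF3t (pvStepB tgt tm istar b kw) (pvStepM tgt tm m kw) hstep
      refine ⟨ih1, ?_⟩
      rintro (hb | ⟨k, hk, hkeq⟩)
      · exact ih2 (Or.inl (pv_stepB_ne_none tgt tm istar b kw (Or.inl hb)))
      · rcases List.mem_cons.mp hk with rfl | hkt
        · exact ih2 (Or.inl (pv_stepB_ne_none tgt tm istar b k
            (Or.inr ((hF3 k List.mem_cons_self).mpr hkeq))))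
        · exact ih2 (Or.inr ⟨k, hkt, hkeq⟩)

-- a prefix of a suffix is an infix
theorem pv_prefix_drop_infix (sub tgt : List Char) (i : Nat) (h : sub <+: tgt.drop i) :
    sub <:+: tgt :=
  h.isInfix.trans (tgt.drop_suffix i).isInfix

-- the core equality, with the target and the per-keyword search term abstracted
theorem pv_core (tgt : List Char) (tm : String → List Char) (ks : List String) :
    (let ms := ks.foldl (fun acc kw =>
        if PySem.Chars.find tgt (tm kw) ≠ -1 then
          acc ++ [(PySem.Chars.find tgt (tm kw), -(PySem.Str.len kw : Int), kw)]
        else acc) ([] : List (Int × Int × String));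
      if ms.isEmpty then none
      else ((PySem.List.sorted2 ms (fun x => x.1) (fun x => x.2.1)).head?).map (fun x => x.2.2))
    = (List.range (tgt.length + 1)).findSome? (fun i =>
        ks.foldl (fun best kw =>
          if PySem.Chars.startswith (tgt.drop i) (tm kw) &&
             (match best with
              | none => true
              | some b => decide (PySem.Str.len b < PySem.Str.len kw))
          then some kw else best) none) := by
  -- A's loop collects exactly the matched keywords, in order
  have hms : ks.foldl (fun acc kw =>
        if PySem.Chars.find tgt (tm kw) ≠ -1 then
          acc ++ [(PySem.Chars.find tgt (tm kw), -(PySem.Str.len kw : Int), kw)]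
        else acc) ([] : List (Int × Int × String))
      = (ks.filter (fun kw => decide (PySem.Chars.find tgt (tm kw) ≠ -1))).map
          (fun kw => (PySem.Chars.find tgt (tm kw), -(PySem.Str.len kw : Int), kw)) := by
    simpa using PySem.List.foldl_append_ite
      (p := fun kw => PySem.Chars.find tgt (tm kw) ≠ -1)
      (f := fun kw => (PySem.Chars.find tgt (tm kw), -(PySem.Str.len kw : Int), kw)) ks []
  simp only [hms]
  by_cases hall : ∀ kw ∈ ks, PySem.Chars.find tgt (tm kw) = -1
  · -- no keyword occurs: both sides are none
    have hfilter : ks.filter (fun kw => decide (PySem.Chars.find tgt (tm kw) ≠ -1)) = [] := by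
      rw [List.filter_eq_nil_iff]
      intro kw hkw
      simp [hall kw hkw]
    rw [hfilter]
    simp only [List.map_nil, List.isEmpty_nil, if_true]
    symm
    rw [List.findSome?_eq_none_iff]
    intro i _
    apply pv_best_none tgt i tm ks _ none rfl
    intro kw hkw hpre
    have : PySem.Chars.find tgt (tm kw) ≠ -1 :=
      (PySem.Chars.find_ne_neg_one_iff tgt (tm kw)).mpr (pv_prefix_drop_infix _ _ _ hpre)
    exact this (hall kw hkw)
  · -- some keyword occurs: both sides return the first-position longest keyword
    rw [not_forall] at hall
    obtain ⟨kw0, hall0⟩ := hall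
    rw [Classical.not_imp] at hall0
    obtain ⟨hkw0, hfind0⟩ := hall0
    have hq : ∃ n : Nat, ∃ kw ∈ ks, PySem.Chars.find tgt (tm kw) = (n : Int) := by
      refine ⟨(PySem.Chars.find tgt (tm kw0)).toNat, kw0, hkw0, ?_⟩
      have := PySem.Chars.neg_one_le_find tgt (tm kw0)
      omega
    obtain ⟨istar, histar⟩ : ∃ m, m = Nat.find hq := ⟨_, rfl⟩
    obtain ⟨kws, hkws, hkwseq⟩ : ∃ kw ∈ ks, PySem.Chars.find tgt (tm kw) = (istar : Int) :=
      histar ▸ Nat.find_spec hq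
    have hF2 : ∀ kw ∈ ks, PySem.Chars.find tgt (tm kw) ≠ -1 →
        (istar : Int) ≤ PySem.Chars.find tgt (tm kw) := by
      intro kw hkw hne
      have hnn : 0 ≤ PySem.Chars.find tgt (tm kw) := by
        have := PySem.Chars.neg_one_le_find tgt (tm kw)
        omega
      by_contra hlt
      exact Nat.find_min hq (m := (PySem.Chars.find tgt (tm kw)).toNat) (by omega)
        ⟨kw, hkw, by omega⟩
    have hF3 : ∀ kw ∈ ks,
        (tm kw <+: tgt.drop istar ↔ PySem.Chars.find tgt (tm kw) = (istar : Int)) := by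
      intro kw hkw
      constructor
      · intro hpre
        have hnn : 0 ≤ PySem.Chars.find tgt (tm kw) :=
          (PySem.Chars.find_nonneg_iff tgt (tm kw)).mpr (pv_prefix_drop_infix _ _ _ hpre)
        obtain ⟨-, hmin⟩ := PySem.Chars.find_spec hnn
        have hle : (PySem.Chars.find tgt (tm kw)).toNat ≤ istar := by
          by_contra hgt
          exact hmin istar (by omega) hpre
        have hge := hF2 kw hkw (by omega)
        omega
      · intro heq
        have hnn : 0 ≤ PySem.Chars.find tgt (tm kw) := by rw [heq]; exact Int.natCast_nonneg _
        obtain ⟨hpre, -⟩ := PySem.Chars.find_spec hnn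
        have : (PySem.Chars.find tgt (tm kw)).toNat = istar := by omega
        rwa [this] at hpre
    have hF4 : ∀ i < istar, ∀ kw ∈ ks, ¬ tm kw <+: tgt.drop i := by
      intro i hi kw hkw hpre
      have hnn : 0 ≤ PySem.Chars.find tgt (tm kw) :=
        (PySem.Chars.find_nonneg_iff tgt (tm kw)).mpr (pv_prefix_drop_infix _ _ _ hpre)
      obtain ⟨-, hmin⟩ := PySem.Chars.find_spec hnn
      have hle : (PySem.Chars.find tgt (tm kw)).toNat ≤ i := by
        by_contra hgt
        exact hmin i (by omega) hpre
      exact Nat.find_min hq (m := (PySem.Chars.find tgt (tm kw)).toNat) (by omega)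
        ⟨kw, hkw, by omega⟩
    have hF5 : istar ≤ tgt.length := by
      have := PySem.Chars.find_le_length tgt (tm kws)
      omega
    -- run the synchronised fold from the empty states
    obtain ⟨hIfin, hne⟩ := pv_sync tgt tm istar ks hF2 hF3 none none rfl
    have hbne := hne (Or.inr ⟨kws, hkws, hkwseq⟩)
    -- the final states
    cases hmfin : ks.foldl (pvStepM tgt tm) (none : Option (Int × Int × String)) with
    | none => rw [hmfin] at hIfin; exact absurd hIfin hbne
    | some fnw =>
        obtain ⟨f, nl, w⟩ := fnw
        rw [hmfin] at hIfin
        obtain ⟨hnl, hif, hbval⟩ := hIfin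
        have hfistar : f = (istar : Int) := by
          by_contra hff
          rw [hbval] at hbne
          simp [hff] at hbne
        have hbfin : ks.foldl (pvStepB tgt tm istar) none = some w := by
          rw [hbval, if_pos hfistar]
        -- left-hand side: head of the stable sort is the first (pos, -len) minimum
        have hnonempty : ((ks.filter (fun kw => decide (PySem.Chars.find tgt (tm kw) ≠ -1))).map
            (fun kw => (PySem.Chars.find tgt (tm kw), -(PySem.Str.len kw : Int), kw))).isEmpty = false := by
          simp only [List.isEmpty_eq_false_iff, ne_eq, List.map_eq_nil_iff]
          intro hnil
          have : kw0 ∈ ks.filter (fun kw => decide (PySem.Chars.find tgt (tm kw) ≠ -1)) :=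
            List.mem_filter.mpr ⟨hkw0, by simp [hfind0]⟩
          rw [hnil] at this
          exact List.not_mem_nil this
        rw [hnonempty]
        simp only [Bool.false_eq_true, if_false]
        rw [pv_head?_sorted2]
        -- A's minimum as a fold over the keywords
        have hmin : PySem.List.min2? ((ks.filter (fun kw => decide (PySem.Chars.find tgt (tm kw) ≠ -1))).map
              (fun kw => (PySem.Chars.find tgt (tm kw), -(PySem.Str.len kw : Int), kw)))
              (fun x => x.1) (fun x => x.2.1)
            = ks.foldl (pvStepM tgt tm) none := by
          rw [PySem.List.min2?, List.foldl_map, ← PySem.List.foldl_ite_eq_foldl_filter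
            (p := fun kw => PySem.Chars.find tgt (tm kw) ≠ -1)]
          apply PySem.List.foldl_congr_mem
          intro acc x _
          cases acc with
          | none => rfl
          | some mm => rfl
        rw [hmin, hmfin]
        -- right-hand side: the scan stops exactly at position istar with value w
        have hg : (fun i => ks.foldl (fun best kw =>
            if PySem.Chars.startswith (tgt.drop i) (tm kw) &&
               (match best with
                | none => true
                | some b => decide (PySem.Str.len b < PySem.Str.len kw))
            then some kw else best) none)
            = (fun i => ks.foldl (pvStepB tgt tm i) none) := rfl
        rw [hg, pv_findSome?_range (fun i => ks.foldl (pvStepB tgt tm i) none)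
          (tgt.length + 1) istar w (by omega)
          (fun j hj => pv_best_none tgt j tm ks (fun kw hkw => hF4 j hj kw hkw) none rfl)
          hbfin]
        simp [hfistar]

-- ===== VERDICT (by name: the statement is the Claim_ definition above) =====
theorem find_contained_keyword_spec : Claim_equal_find_contained_keyword := by
  intro input_str keyword_list case_sensitive _
  unfold Spec_find_contained_keyword
  have hB : find_contained_keyword_alt input_str keyword_list case_sensitive
      = (List.range ((if case_sensitive = true then input_str.toList
            else PySem.Chars.lower input_str.toList).length + 1)).findSome? (fun i =>
          keyword_list.foldl (fun best kw =>
            if PySem.Chars.startswith ((if case_sensitive = true then input_str.toList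
                  else PySem.Chars.lower input_str.toList).drop i)
                (if case_sensitive = true then kw.toList else PySem.Chars.lower kw.toList) &&
               (match best with
                | none => true
                | some b => decide (PySem.Str.len b < PySem.Str.len kw))
            then some kw else best) none) := by
    simp only [find_contained_keyword_alt, List.foldl_map]
  rw [hB]
  exact pv_core (if case_sensitive = true then input_str.toList
      else PySem.Chars.lower input_str.toList)
    (fun kw => if case_sensitive = true then kw.toList else PySem.Chars.lower kw.toList)
    keyword_list
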